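-- pv_equiv track=rewrite | github.com/iammiori/Algorithm_study | old/baekjoon/boj_3085.py | check
-- ===== SOURCE A (Python) =====
-- def check(arr, start_row, end_row, start_col, end_col):
-- 	n = len(arr)
-- 	ans = 1
-- 	# 행
-- 	for i in range(start_row, end_row+1):
-- 		cnt = 1
-- 		for j in range(1,n) :
-- 			if arr[i][j] == arr[i][j-1] :
-- 				cnt += 1
-- 			else :
-- 				cnt = 1
-- 			if ans < cnt :
-- 				ans = cnt
-- 	# 열
-- 	for i in range(start_col,end_col+1):
-- 		cnt = 1
-- 		for j in range(1,n):
-- 			if arr[j][i] == arr[j-1][i]: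
-- 				cnt += 1
-- 			else :
-- 				cnt = 1
-- 			if ans < cnt :
-- 				ans = cnt
-- 	return ans
-- ===== SOURCE B (Python) =====
-- def _longest_run(line):
--     # change-point method: collect the boundaries where the value changes,
--     # then the longest run is the largest distance between consecutive boundaries
--     n = len(line)
--     bounds = [0] + [k for k in range(1, n) if line[k] != line[k - 1]] + [n]
--     return max(b - a for a, b in zip(bounds, bounds[1:]))
--
--
-- def check(arr, start_row, end_row, start_col, end_col):
--     n = len(arr)
--     if n < 2:
--         return 1
--     lines = [arr[i][:n] for i in range(start_row, end_row + 1)]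
--     lines += [[arr[j][i] for j in range(n)] for i in range(start_col, end_col + 1)]
--     return max(map(_longest_run, lines), default=1)
-- ===== Notes on version B (the rewrite author's own statement) =====
-- stated objective: alternative
-- what changed: B replaces A's running-counter scan with a change-point method: for each requested row/column line it first collects the boundary positions where adjacent cells differ, then takes the longest run as the largest gap between consecutive boundaries, and the overall answer as max over the lines with default 1; A instead threads a cnt/ans state through two copies of nested index loops.
import Mathlib
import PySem

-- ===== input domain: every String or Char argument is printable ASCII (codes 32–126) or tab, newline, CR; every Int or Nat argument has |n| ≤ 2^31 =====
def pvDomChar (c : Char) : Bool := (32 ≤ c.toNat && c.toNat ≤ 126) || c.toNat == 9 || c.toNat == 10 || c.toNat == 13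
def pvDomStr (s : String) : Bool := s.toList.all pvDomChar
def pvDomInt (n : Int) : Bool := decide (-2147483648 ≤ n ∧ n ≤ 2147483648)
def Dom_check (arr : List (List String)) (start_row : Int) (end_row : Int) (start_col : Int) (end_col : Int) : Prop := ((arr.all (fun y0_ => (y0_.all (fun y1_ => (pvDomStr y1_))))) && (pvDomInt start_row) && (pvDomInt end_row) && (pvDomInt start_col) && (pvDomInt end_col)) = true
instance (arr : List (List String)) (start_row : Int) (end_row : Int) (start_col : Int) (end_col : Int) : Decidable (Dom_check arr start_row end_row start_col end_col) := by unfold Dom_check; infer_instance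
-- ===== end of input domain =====

-- B replaces A's running-counter scan by a change-point method: per line it collects the
-- boundaries where adjacent cells differ and takes the largest gap between consecutive
-- boundaries, then the max over all requested lines (default 1); same cost, different algorithm.

-- arr[i][j] (shared indexing helper; total form, exact under Pre_)
def pvCell (arr : List (List String)) (i j : Int) : String :=
  PySem.List.pyGetD (PySem.List.pyGetD arr i []) j ""

-- ===== PORT A =====
def check (arr : List (List String)) (start_row : Int) (end_row : Int) (start_col : Int) (end_col : Int) : Int :=
  let n : Int := arr.length
  let ans : Int := 1
  -- 행 (rows)
  let ans := (PySem.List.pyRange start_row (end_row + 1) 1).foldl (fun ans i =>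
      ((PySem.List.pyRange 1 n 1).foldl (fun (s : Int × Int) j =>
          let cnt := if pvCell arr i j == pvCell arr i (j - 1) then s.1 + 1 else 1
          (cnt, if s.2 < cnt then cnt else s.2)) (1, ans)).2) ans
  -- 열 (columns)
  let ans := (PySem.List.pyRange start_col (end_col + 1) 1).foldl (fun ans i =>
      ((PySem.List.pyRange 1 n 1).foldl (fun (s : Int × Int) j =>
          let cnt := if pvCell arr j i == pvCell arr (j - 1) i then s.1 + 1 else 1
          (cnt, if s.2 < cnt then cnt else s.2)) (1, ans)).2) ans
  ans

-- ===== PORT B =====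
-- _longest_run: bounds = [0] + change positions + [n]; answer = max gap between consecutive bounds.
-- The gap list is never empty (bounds always has ≥ 2 elements), so Python's max never raises;
-- the default 0 of maxD is unreachable.
def pvLongestRunB (line : List String) : Int :=
  let n : Int := line.length
  let bounds : List Int :=
    0 :: ((PySem.List.pyRange 1 n 1).filter
        (fun k => !(PySem.List.pyGetD line k "" == PySem.List.pyGetD line (k - 1) "")) ++ [n])
  PySem.List.maxD ((bounds.zip bounds.tail).map fun p => p.2 - p.1) (fun v => v) 0

def check_alt (arr : List (List String)) (start_row : Int) (end_row : Int) (start_col : Int) (end_col : Int) : Int :=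
  let n : Int := arr.length
  if n < 2 then 1 else
    let lines :=
      (PySem.List.pyRange start_row (end_row + 1) 1).map
        (fun i => PySem.List.slice (PySem.List.pyGetD arr i []) none (some n))
      ++ (PySem.List.pyRange start_col (end_col + 1) 1).map
        (fun i => (PySem.List.pyRange 0 n 1).map (fun j => pvCell arr j i))
    PySem.List.maxD (lines.map pvLongestRunB) (fun v => v) 1

-- ===== PRECONDITION & SPEC =====
-- Pre_ excludes exactly the inputs where Python A raises IndexError: when n = len(arr) ≥ 2 it
-- indexes arr[i] (and its first n cells) for every i in the row range, and arr[j][i] for every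
-- row j and every i in the column range; nothing is indexed when n < 2.
def Pre_check (arr : List (List String)) (start_row : Int) (end_row : Int) (start_col : Int) (end_col : Int) : Prop :=
  2 ≤ (arr.length : Int) →
    ((start_row ≤ end_row →
        -(arr.length : Int) ≤ start_row ∧ end_row < (arr.length : Int)) ∧
     (∀ p ∈ arr.zipIdx,
        ((start_row ≤ (p.2 : Int) ∧ (p.2 : Int) ≤ end_row) ∨
         (start_row ≤ (p.2 : Int) - (arr.length : Int) ∧
          (p.2 : Int) - (arr.length : Int) ≤ end_row)) →
        (arr.length : Int) ≤ (p.1.length : Int)) ∧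
     (start_col ≤ end_col →
        ∀ row ∈ arr, -(row.length : Int) ≤ start_col ∧ end_col < (row.length : Int)))
instance (arr : List (List String)) (start_row : Int) (end_row : Int) (start_col : Int) (end_col : Int) : Decidable (Pre_check arr start_row end_row start_col end_col) := by unfold Pre_check; infer_instance

def pvWitness_check : List (List String) × Int × Int × Int × Int :=
  ([["a", "b"], ["b", "b"]], 0, 1, 0, 1)

def Spec_check (arr : List (List String)) (start_row : Int) (end_row : Int) (start_col : Int) (end_col : Int) (out : Int) : Prop := out = check_alt arr start_row end_row start_col end_col
instance (arr : List (List String)) (start_row : Int) (end_row : Int) (start_col : Int) (end_col : Int) (out : Int) : Decidable (Spec_check arr start_row end_row start_col end_col out) := by unfold Spec_check; infer_instance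

-- ===== CLAIM (what is proved, stated in full; the proofs are below) =====
def Claim_equal_check : Prop := ∀ (arr : List (List String)) (start_row : Int) (end_row : Int) (start_col : Int) (end_col : Int), Dom_check arr start_row end_row start_col end_col → Pre_check arr start_row end_row start_col end_col → Spec_check arr start_row end_row start_col end_col (check arr start_row end_row start_col end_col)

-- ===== LEMMAS AND PROOFS =====

-- A's inner-loop body as a function of (prev cell, cur cell)
def pvStepA (s : Int × Int) (prev cur : String) : Int × Int :=
  let cnt := if cur == prev then s.1 + 1 else 1
  (cnt, if s.2 < cnt then cnt else s.2)

def pvAfold (ps : List (String × String)) (s : Int × Int) : Int × Int :=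
  ps.foldl (fun s p => pvStepA s p.1 p.2) s

-- the streaming longest-run value A's inner loop computes (proof-side characterisation)
def pvRunScan (l : List String) : Int := (pvAfold (l.zip l.tail) (1, 1)).2

-- the change positions of a line, exactly as B's comprehension computes them
def pvCuts (l : List String) : List Int :=
  (PySem.List.pyRange 1 (l.length : Int) 1).filter
    (fun k => !(PySem.List.pyGetD l k "" == PySem.List.pyGetD l (k - 1) ""))

-- (last gap, max gap) of the bound list p :: bs
def pvGM : Int → List Int → Int × Int
  | _, [] => (0, 0)
  | p, [b] => (b - p, b - p)
  | p, b :: c :: cs => ((pvGM b (c :: cs)).1, max (b - p) (pvGM b (c :: cs)).2)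

theorem pvGM_cons (p d : Int) (l : List Int) (h : l ≠ []) :
    pvGM p (d :: l) = ((pvGM d l).1, max (d - p) (pvGM d l).2) := by
  cases l with
  | nil => exact absurd rfl h
  | cons c cs => rfl

theorem pvAfold_ge (ps : List (String × String)) :
    ∀ s : Int × Int, 1 ≤ s.1 → 1 ≤ s.2 → 1 ≤ (pvAfold ps s).1 ∧ 1 ≤ (pvAfold ps s).2 := by
  induction ps with
  | nil => intro s h1 h2; exact ⟨h1, h2⟩
  | cons p ps ih =>
      intro s h1 h2
      simp only [pvAfold, List.foldl_cons]
      exact ih _ (by unfold pvStepA; dsimp only; split_ifs <;> omega)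
               (by unfold pvStepA; dsimp only; split_ifs <;> omega)

theorem pvRunScan_ge_one (l : List String) : 1 ≤ pvRunScan l :=
  (pvAfold_ge (l.zip l.tail) (1, 1) (by norm_num) (by norm_num)).2

theorem pvAfold_mono (ps : List (String × String)) :
    ∀ (c a : Int), 1 ≤ a →
      pvAfold ps (c, a) = ((pvAfold ps (c, 1)).1, max a (pvAfold ps (c, 1)).2) := by
  induction ps with
  | nil => intro c a h; simp [pvAfold]; omega
  | cons p ps ih =>
      intro c a h
      have hstep : ∀ b : Int, pvStepA (c, b) p.1 p.2
          = ((if p.2 == p.1 then c + 1 else 1), max b (if p.2 == p.1 then c + 1 else 1)) := by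
        intro b; simp only [pvStepA, Prod.mk.injEq]
        exact ⟨trivial, by omega⟩
      simp only [pvAfold, List.foldl_cons] at *
      rw [hstep, hstep]
      rw [ih _ _ (by omega), ih _ _ (by omega : (1:Int) ≤ max 1 (if p.2 == p.1 then c + 1 else 1))]
      simp only [Prod.mk.injEq]
      exact ⟨trivial, by omega⟩

-- maxD over the gaps of the bound list (p :: bs) is the max-gap component of pvGM
theorem pvGM_zip (bs : List Int) : ∀ p : Int, bs ≠ [] →
    PySem.List.maxD (((p :: bs).zip bs).map fun q => q.2 - q.1) (fun v => v) 0
      = (pvGM p bs).2 := by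
  induction bs with
  | nil => intro p h; exact absurd rfl h
  | cons b bs ih =>
      intro p _
      cases bs with
      | nil => simp [PySem.List.maxD, PySem.List.max?, pvGM]
      | cons c cs =>
          have hzip : ((p :: b :: c :: cs).zip (b :: c :: cs)).map (fun q : Int × Int => q.2 - q.1)
              = (b - p) :: (c - b) ::
                (((c :: cs).zip cs).map fun q : Int × Int => q.2 - q.1) := by
            simp [List.zip_cons_cons]
          have ih' := ih b (by simp)
          rw [show ((b :: c :: cs).zip (c :: cs)).map (fun q : Int × Int => q.2 - q.1)
                = (c - b) :: (((c :: cs).zip cs).map fun q : Int × Int => q.2 - q.1) from by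
              simp [List.zip_cons_cons]] at ih'
          rw [hzip, show PySem.List.maxD ((b - p) :: (c - b) ::
                (((c :: cs).zip cs).map fun q : Int × Int => q.2 - q.1)) (fun v => v) 0
              = ((c - b) :: (((c :: cs).zip cs).map fun q : Int × Int => q.2 - q.1)).foldl
                  max (b - p) from by
              simp [PySem.List.maxD, PySem.List.max?_id_cons]]
          rw [show PySem.List.maxD ((c - b) ::
                (((c :: cs).zip cs).map fun q : Int × Int => q.2 - q.1)) (fun v => v) 0
              = ((((c :: cs).zip cs).map fun q : Int × Int => q.2 - q.1)).foldl max (c - b) from by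
              simp [PySem.List.maxD, PySem.List.max?_id_cons]] at ih'
          rw [pvGM_cons p b (c :: cs) (by simp), ← ih']
          simp only [List.foldl_cons]
          rw [List.foldl_assoc]

theorem pvGM_snoc_succ : ∀ (cs : List Int) (p n : Int),
    pvGM p (cs ++ [n + 1])
      = ((pvGM p (cs ++ [n])).1 + 1,
         max (pvGM p (cs ++ [n])).2 ((pvGM p (cs ++ [n])).1 + 1)) := by
  intro cs
  induction cs with
  | nil => intro p n; simp [pvGM]; omega
  | cons d cs ih =>
      intro p n
      rw [List.cons_append, List.cons_append, pvGM_cons p d _ (by simp),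
        pvGM_cons p d _ (by simp), ih d n]
      simp only [Prod.ext_iff]
      constructor
      · trivial
      · dsimp only; omega

theorem pvGM_snoc_cut : ∀ (cs : List Int) (p n : Int),
    pvGM p (cs ++ [n, n + 1]) = (1, max (pvGM p (cs ++ [n])).2 1) := by
  intro cs
  induction cs with
  | nil => intro p n; simp [pvGM]
  | cons d cs ih =>
      intro p n
      rw [List.cons_append, List.cons_append, pvGM_cons p d _ (by simp),
        pvGM_cons p d _ (by simp), ih d n]
      simp only [Prod.ext_iff]
      constructor
      · trivial
      · dsimp only; omega

theorem pvLongestRunB_eq_gm (l : List String) :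
    pvLongestRunB l = (pvGM 0 (pvCuts l ++ [(l.length : Int)])).2 := by
  have h := pvGM_zip (pvCuts l ++ [(l.length : Int)]) 0 (by simp)
  simpa [pvLongestRunB, pvCuts] using h

theorem pvGetD_append_left (l : List String) (x : String) (j : Int) (d : String)
    (h0 : 0 ≤ j) (h1 : j < (l.length : Int)) :
    PySem.List.pyGetD (l ++ [x]) j d = PySem.List.pyGetD l j d := by
  rw [PySem.List.pyGetD_eq_getElem _ _ h0 (by simp; omega),
      PySem.List.pyGetD_eq_getElem _ _ h0 h1]
  exact List.getElem_append_left (by omega)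

theorem pvCuts_concat (l : List String) (x : String) (h : l ≠ []) :
    pvCuts (l ++ [x])
      = pvCuts l ++ (if x == l.getLastD "" then [] else [(l.length : Int)]) := by
  have hl : 1 ≤ l.length := List.length_pos_iff.mpr h
  unfold pvCuts
  rw [show (((l ++ [x]).length : Nat) : Int) = (l.length : Int) + 1 from by simp]
  rw [PySem.List.pyRange_one_succ_right (by omega), List.filter_append]
  congr 1
  · apply List.filter_congr
    intro k hk
    have hk' : 1 ≤ k ∧ k < (l.length : Int) := by
      simpa [PySem.List.mem_pyRange_one] using hk
    rw [pvGetD_append_left l x k "" (by omega) (by omega),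
        pvGetD_append_left l x (k - 1) "" (by omega) (by omega)]
  · have h1 : PySem.List.pyGetD (l ++ [x]) (l.length : Int) "" = x := by
      rw [PySem.List.pyGetD_eq_getElem _ _ (by omega) (by simp)]
      simp
    have h2 : PySem.List.pyGetD (l ++ [x]) ((l.length : Int) - 1) "" = l.getLastD "" := by
      rw [pvGetD_append_left l x _ "" (by omega) (by omega),
          show ((l.length : Int) - 1) = ((l.length - 1 : Nat) : Int) from by omega,
          PySem.List.pyGetD_natCast]
      rw [List.getLastD_eq_getLast?, List.getLast?_eq_getElem?]
      simp [List.getD, List.getElem?_eq_getElem (by omega : l.length - 1 < l.length)]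
    simp only [List.filter, h1, h2]
    cases hx : x == l.getLastD "" <;> simp

theorem pvZipTailConcat (x : String) : ∀ (l : List String), l ≠ [] →
    (l ++ [x]).zip (l ++ [x]).tail = l.zip l.tail ++ [(l.getLastD "", x)] := by
  intro l
  induction l with
  | nil => intro h; exact absurd rfl h
  | cons a t ih =>
      intro _
      cases t with
      | nil => simp
      | cons b t' =>
          have ih' := ih (by simp)
          simp only [List.cons_append, List.tail_cons, List.zip_cons_cons] at *
          rw [ih']
          simp

-- invariant: A's streaming state over a nonempty line is (last gap, max gap) of its bound list
theorem pvInv : ∀ (l : List String), l ≠ [] →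
    pvAfold (l.zip l.tail) (1, 1) = pvGM 0 (pvCuts l ++ [(l.length : Int)]) := by
  intro l
  induction l using List.reverseRecOn with
  | nil => intro h; exact absurd rfl h
  | append_singleton l' x ih =>
      intro _
      by_cases h' : l' = []
      · subst h'
        simp [pvAfold, pvCuts, pvGM, PySem.List.pyRange_one_eq_nil (by norm_num : (1:Int) ≤ 1)]
      · rw [pvZipTailConcat x l' h']
        have hA : pvAfold (l'.zip l'.tail ++ [(l'.getLastD "", x)]) (1, 1)
            = pvStepA (pvAfold (l'.zip l'.tail) (1, 1)) (l'.getLastD "") x := by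
          simp [pvAfold, List.foldl_append]
        have hge := pvAfold_ge (l'.zip l'.tail) (1, 1) (by norm_num) (by norm_num)
        rw [hA, ih h', pvCuts_concat l' x h',
          show (((l' ++ [x]).length : Nat) : Int) = (l'.length : Int) + 1 from by simp]
        rw [ih h'] at hge
        cases hx : x == l'.getLastD "" with
        | false =>
            rw [if_neg (by simp),
              show pvCuts l' ++ [(l'.length : Int)] ++ [(l'.length : Int) + 1]
                  = pvCuts l' ++ [(l'.length : Int), (l'.length : Int) + 1] from by simp,
              pvGM_snoc_cut]
            unfold pvStepA
            rw [hx]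
            simp only [Bool.false_eq_true, if_false, Prod.ext_iff]
            constructor
            · trivial
            · dsimp only; omega
        | true =>
            rw [if_pos rfl, List.append_nil,
              pvGM_snoc_succ]
            unfold pvStepA
            rw [hx]
            simp only [if_true, Prod.ext_iff]
            constructor
            · trivial
            · dsimp only; omega

theorem pvRunB_eq_scan (l : List String) (h : l ≠ []) : pvLongestRunB l = pvRunScan l := by
  rw [pvLongestRunB_eq_gm, ← pvInv l h]; rfl

-- index fold over range(1, len(l)) comparing l[j-1], l[j]  =  fold over zip(l, l[1:])
theorem pvPairs (l : List String) :
    (PySem.List.pyRange 1 (l.length : Int) 1).map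
      (fun j => (PySem.List.pyGetD l (j - 1) "", PySem.List.pyGetD l j "")) = l.zip l.tail := by
  apply List.ext_getElem
  · simp only [List.length_map, PySem.List.length_pyRange_one, List.length_zip,
      List.length_tail]
    omega
  · intro k h1 h2
    have hk : k < l.length - 1 := by
      simpa [PySem.List.length_pyRange_one] using h1
    have hk1 : k + 1 < l.length := by omega
    simp only [List.getElem_map, PySem.List.getElem_pyRange_one, List.getElem_zip,
      List.getElem_tail]
    have e1 : (1 : Int) + k - 1 = (k : Int) := by ring
    have e2 : (1 : Int) + k = ((k + 1 : Nat) : Int) := by push_cast; ring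
    rw [e1, e2, PySem.List.pyGetD_natCast, PySem.List.pyGetD_natCast]
    simp [List.getD, hk1, Nat.lt_of_lt_of_le hk (Nat.sub_le _ _)]

theorem pvIdxFold (l : List String) (g : Int × Int → String → String → Int × Int) (s : Int × Int) :
    (PySem.List.pyRange 1 (l.length : Int) 1).foldl
        (fun s j => g s (PySem.List.pyGetD l (j - 1) "") (PySem.List.pyGetD l j "")) s
      = (l.zip l.tail).foldl (fun s p => g s p.1 p.2) s := by
  rw [← pvPairs l, List.foldl_map]

theorem pvFoldlConst (l : List Int) (a : Int) : l.foldl (fun a _ => a) a = a := by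
  induction l generalizing a with
  | nil => rfl
  | cons x l ih => exact ih a

theorem pvInner (n : Int) (cell : Int → String) (l : List String)
    (hlen : (l.length : Int) = n)
    (hcell : ∀ j : Int, 0 ≤ j → j < n → cell j = PySem.List.pyGetD l j "") :
    ∀ a : Int, 1 ≤ a →
      ((PySem.List.pyRange 1 n 1).foldl (fun (s : Int × Int) j =>
          let cnt := if cell j == cell (j - 1) then s.1 + 1 else 1
          (cnt, if s.2 < cnt then cnt else s.2)) (1, a)).2
        = max a (pvRunScan l) := by
  intro a ha
  subst hlen
  have hcong : (PySem.List.pyRange 1 (l.length : Int) 1).foldl (fun (s : Int × Int) j =>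
        let cnt := if cell j == cell (j - 1) then s.1 + 1 else 1
        (cnt, if s.2 < cnt then cnt else s.2)) (1, a)
      = (PySem.List.pyRange 1 (l.length : Int) 1).foldl (fun (s : Int × Int) j =>
          pvStepA s (PySem.List.pyGetD l (j - 1) "") (PySem.List.pyGetD l j "")) (1, a) := by
    apply PySem.List.foldl_congr_mem
    intro s j hj
    have hj' : 1 ≤ j ∧ j < (l.length : Int) := by
      simpa [PySem.List.mem_pyRange_one] using hj
    rw [hcell j (by omega) (by omega), hcell (j - 1) (by omega) (by omega)]
    rfl
  rw [hcong, pvIdxFold l pvStepA (1, a)]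
  have : (l.zip l.tail).foldl (fun s p => pvStepA s p.1 p.2) (1, a) = pvAfold (l.zip l.tail) (1, a) := rfl
  rw [this, pvAfold_mono _ _ _ ha]
  rfl

theorem pvFoldMap (idxs : List Int) (F : Int → Int → Int) (vals : Int → Int)
    (hF : ∀ i ∈ idxs, ∀ a : Int, 1 ≤ a → F a i = max a (vals i)) :
    ∀ a : Int, 1 ≤ a → idxs.foldl F a = (idxs.map vals).foldl max a := by
  induction idxs with
  | nil => intro a _; rfl
  | cons i idxs ih =>
      intro a ha
      simp only [List.foldl_cons, List.map_cons]
      rw [hF i List.mem_cons_self a ha]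
      exact ih (fun j hj => hF j (List.mem_cons_of_mem _ hj)) _ (by omega)

theorem pvMaxD_eq_foldl (l : List Int) (h : ∀ v ∈ l, 1 ≤ v) :
    PySem.List.maxD l (fun v => v) 1 = l.foldl max 1 := by
  cases l with
  | nil => rfl
  | cons v vs =>
      rw [show PySem.List.maxD (v :: vs) (fun v => v) 1 = vs.foldl max v from by
        simp [PySem.List.maxD, PySem.List.max?_id_cons]]
      simp only [List.foldl_cons]
      have hv := h v (by simp)
      congr 1
      omega

theorem pvPreExpand (arr : List (List String)) (start_row end_row start_col end_col : Int)
    (h : Pre_check arr start_row end_row start_col end_col)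
    (hn : 2 ≤ (arr.length : Int)) :
    (∀ i ∈ PySem.List.pyRange start_row (end_row + 1) 1,
        PySem.Raise.InRange arr.length i ∧
        (arr.length : Int) ≤ ((PySem.List.pyGetD arr i []).length : Int)) ∧
    (∀ i ∈ PySem.List.pyRange start_col (end_col + 1) 1,
        ∀ row ∈ arr, PySem.Raise.InRange row.length i) := by
  obtain ⟨hrb, hrl, hcb⟩ := h hn
  constructor
  · intro i hi
    have hi' : start_row ≤ i ∧ i < end_row + 1 := by
      simpa [PySem.List.mem_pyRange_one] using hi
    have hb := hrb (by omega)
    have hir : PySem.Raise.InRange arr.length i := by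
      simp only [PySem.Raise.InRange]; omega
    refine ⟨hir, ?_⟩
    by_cases h0 : 0 ≤ i
    · have hlt : i < (arr.length : Int) := by omega
      have htn : i.toNat < arr.length := by omega
      rw [PySem.List.pyGetD_eq_getElem arr [] h0 hlt]
      refine hrl (arr[i.toNat], i.toNat) ?_ ?_
      · exact (List.mk_mem_zipIdx_iff_getElem?).2 (List.getElem?_eq_getElem htn)
      · left; omega
    · have hk0 : 0 < (-i).toNat := by omega
      have hkl : (-i).toNat ≤ arr.length := by omega
      have hieq : i = -(((-i).toNat : Nat) : Int) := by omega
      rw [hieq, PySem.List.pyGetD_neg_natCast arr _ [] hk0 hkl]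
      have htn : arr.length - (-i).toNat < arr.length := by omega
      refine hrl (arr[arr.length - (-i).toNat], arr.length - (-i).toNat) ?_ ?_
      · exact (List.mk_mem_zipIdx_iff_getElem?).2 (List.getElem?_eq_getElem htn)
      · right; omega
  · intro i hi row hrow
    have hi' : start_col ≤ i ∧ i < end_col + 1 := by
      simpa [PySem.List.mem_pyRange_one] using hi
    have hb := hcb (by omega) row hrow
    simp only [PySem.Raise.InRange]
    omega

-- ===== VERDICT =====
set_option maxHeartbeats 1000000 in
theorem check_spec : Claim_equal_check := by
  intro arr start_row end_row start_col end_col hdom hpre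
  unfold Spec_check
  simp only [check, check_alt]
  by_cases hn : (arr.length : Int) < 2
  · simp only [if_pos hn, PySem.List.pyRange_one_eq_nil (by omega : (arr.length : Int) ≤ 1),
      List.foldl_nil]
    rw [pvFoldlConst, pvFoldlConst]
  · simp only [if_neg hn]
    obtain ⟨hrow, hcol⟩ := pvPreExpand arr start_row end_row start_col end_col hpre (by omega)
    -- the two line families
    set Lr : Int → List String :=
      fun i => PySem.List.slice (PySem.List.pyGetD arr i []) none (some (arr.length : Int)) with hLr
    set Lc : Int → List String :=
      fun i => (PySem.List.pyRange 0 (arr.length : Int) 1).map (fun j => pvCell arr j i) with hLc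
    have hLrLen : ∀ i ∈ PySem.List.pyRange start_row (end_row + 1) 1,
        ((Lr i).length : Int) = (arr.length : Int) := by
      intro i hi
      obtain ⟨hir, hilen⟩ := hrow i hi
      rw [hLr]
      dsimp only
      rw [PySem.List.slice_to _ (by omega)]
      simp only [List.length_take]
      omega
    have hLcLen : ∀ i : Int, ((Lc i).length : Int) = (arr.length : Int) := by
      intro i
      rw [hLc]
      simp only [List.length_map, PySem.List.length_pyRange_one]
      omega
    -- A side: both nested folds become running maxima of pvRunScan over the lines
    have hrowF : ∀ i ∈ PySem.List.pyRange start_row (end_row + 1) 1, ∀ a : Int, 1 ≤ a →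
        ((PySem.List.pyRange 1 (arr.length : Int) 1).foldl (fun (s : Int × Int) j =>
            let cnt := if pvCell arr i j == pvCell arr i (j - 1) then s.1 + 1 else 1
            (cnt, if s.2 < cnt then cnt else s.2)) (1, a)).2
          = max a (pvRunScan (Lr i)) := by
      intro i hi
      obtain ⟨hir, hilen⟩ := hrow i hi
      refine pvInner (arr.length : Int) (fun j => pvCell arr i j) _ (hLrLen i hi) ?_
      intro j hj0 hjn
      have hsl : Lr i = (PySem.List.pyGetD arr i []).take (arr.length : Int).toNat := by
        rw [hLr]; dsimp only; exact PySem.List.slice_to _ (by omega)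
      have h1 : j < ((PySem.List.pyGetD arr i []).length : Int) := by omega
      have h2 : j < ((Lr i).length : Int) := by rw [hLrLen i hi]; omega
      show PySem.List.pyGetD (PySem.List.pyGetD arr i []) j "" = _
      rw [PySem.List.pyGetD_eq_getElem _ "" hj0 h1,
        PySem.List.pyGetD_eq_getElem _ "" hj0 h2]
      simp only [hsl]
      simp [List.getElem_take]
    have hcolF : ∀ i ∈ PySem.List.pyRange start_col (end_col + 1) 1, ∀ a : Int, 1 ≤ a →
        ((PySem.List.pyRange 1 (arr.length : Int) 1).foldl (fun (s : Int × Int) j =>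
            let cnt := if pvCell arr j i == pvCell arr (j - 1) i then s.1 + 1 else 1
            (cnt, if s.2 < cnt then cnt else s.2)) (1, a)).2
          = max a (pvRunScan (Lc i)) := by
      intro i hi
      refine pvInner (arr.length : Int) (fun j => pvCell arr j i) _ (hLcLen i) ?_
      intro j hj0 hjn
      rw [hLc]
      exact (PySem.List.pyGetD_map_pyRange_of_nonneg (fun j => pvCell arr j i)
        (arr.length : Int) j "" hj0 hjn).symm
    rw [pvFoldMap _ _ _ hrowF 1 (by omega),
      pvFoldMap _ _ _ hcolF _ (PySem.List.le_foldl_max _ _).1]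
    rw [← List.foldl_append]
    -- B side
    rw [List.map_append, List.map_map, List.map_map]
    have hmapR : ((PySem.List.pyRange start_row (end_row + 1) 1).map (pvLongestRunB ∘ Lr))
        = (PySem.List.pyRange start_row (end_row + 1) 1).map (fun i => pvRunScan (Lr i)) := by
      apply List.map_congr_left
      intro i hi
      have := hLrLen i hi
      exact pvRunB_eq_scan _ (by intro hnil; rw [hnil] at this; simp at this; omega)
    have hmapC : ((PySem.List.pyRange start_col (end_col + 1) 1).map (pvLongestRunB ∘ Lc))
        = (PySem.List.pyRange start_col (end_col + 1) 1).map (fun i => pvRunScan (Lc i)) := by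
      apply List.map_congr_left
      intro i _
      have := hLcLen i
      exact pvRunB_eq_scan _ (by intro hnil; rw [hnil] at this; simp at this; omega)
    rw [hmapR, hmapC, pvMaxD_eq_foldl]
    intro v hv
    rcases List.mem_append.mp hv with hv | hv <;>
      · obtain ⟨i, _, rfl⟩ := List.mem_map.mp hv
        exact pvRunScan_ge_one _
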